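-- pv_equiv track=rewrite | github.com/Hortus-Edenensis/x64dbgMCP | src/x64dbg.py | _parse_memory_spec
-- ===== SOURCE A (Python) =====
-- from typing import Any, Dict, List, Callable
--
-- def _split_csv(text: str) -> List[str]:
--     if not text:
--         return []
--     return [item.strip() for item in text.split(",") if item.strip()]
--
-- def _parse_memory_spec(text: str) -> List[Dict[str, str]]:
--     items = _split_csv(text)
--     result = []
--     for item in items:
--         if ":" not in item:
--             continue
--         addr, size = item.split(":", 1)
--         addr = addr.strip()
--         size = size.strip()
--         if addr and size:
--             result.append({"addr": addr, "size": size})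
--     return result
-- ===== SOURCE B (Python) =====
-- def _emit(result, addr, size, seen):
--     if seen:
--         a = "".join(addr).strip()
--         s = "".join(size).strip()
--         if a and s:
--             result.append({"addr": a, "size": s})
--
-- def _parse_memory_spec(text):
--     result = []
--     addr = []
--     size = []
--     seen = False
--     for ch in text:
--         if ch == ",":
--             _emit(result, addr, size, seen)
--             addr, size, seen = [], [], False
--         elif ch == ":" and not seen:
--             seen = True
--         elif seen:
--             size.append(ch)
--         else:
--             addr.append(ch)
--     _emit(result, addr, size, seen)
--     return result
-- ===== Notes on version B (the rewrite author's own statement) =====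
-- stated objective: alternative
-- what changed: Replaces A's split-on-comma / strip / split-on-first-colon pipeline by a single left-to-right character scan that maintains (addr, size, seen-colon) accumulators and flushes them at each comma and at end of input.
import Mathlib
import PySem

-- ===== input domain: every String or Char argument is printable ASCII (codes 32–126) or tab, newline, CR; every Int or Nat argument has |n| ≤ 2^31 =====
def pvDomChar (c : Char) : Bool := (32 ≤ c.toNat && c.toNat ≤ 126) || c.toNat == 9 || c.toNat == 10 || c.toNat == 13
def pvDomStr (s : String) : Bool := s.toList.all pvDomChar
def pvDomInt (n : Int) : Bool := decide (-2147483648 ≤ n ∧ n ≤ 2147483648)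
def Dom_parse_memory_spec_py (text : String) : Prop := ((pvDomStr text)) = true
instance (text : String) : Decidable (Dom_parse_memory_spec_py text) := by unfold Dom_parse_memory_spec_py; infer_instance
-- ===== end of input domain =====

-- B replaces A's split-on-comma / split-on-colon / strip pipeline by a single left-to-right
-- character scan with an explicit (addr, size, seen-colon) accumulator (objective: alternative).

-- ===== PORT A =====
-- port of _split_csv (on the code-point list of the string)
def split_csv_chars (cs : List Char) : List (List Char) :=
  if cs = [] then []
  else ((PySem.Chars.splitOn cs [',']).filter
          (fun item => ¬ (PySem.Chars.strip item = []))).map PySem.Chars.strip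

def parse_memory_spec_py (text : String) : List (List (String × String)) :=
  let items := split_csv_chars text.toList
  items.foldl (fun result item =>
    if PySem.Chars.isIn [':'] item then
      match PySem.Chars.splitOnMax item [':'] 1 with
      | [a0, s0] =>
        let addr := PySem.Chars.strip a0
        let size := PySem.Chars.strip s0
        if addr ≠ [] ∧ size ≠ [] then
          result ++ [[("addr", String.ofList addr), ("size", String.ofList size)]]
        else result
      | _ => result   -- unreachable: item.split(":", 1) with ":" in item always has 2 parts
    else result) []

-- ===== PORT B =====
-- _emit: flush the current chunk's accumulators into result
def pm_emit (result : List (List (String × String))) (addr size : List Char) (seen : Bool) :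
    List (List (String × String)) :=
  if seen then
    let a := PySem.Chars.strip addr   -- "".join(addr).strip()
    let s := PySem.Chars.strip size
    if a ≠ [] ∧ s ≠ [] then
      result ++ [[("addr", String.ofList a), ("size", String.ofList s)]]
    else result
  else result

-- one character of the scanner loop
def pm_step (st : List (List (String × String)) × List Char × List Char × Bool) (ch : Char) :
    List (List (String × String)) × List Char × List Char × Bool :=
  let (result, addr, size, seen) := st
  if ch = ',' then (pm_emit result addr size seen, [], [], false)
  else if ch = ':' ∧ seen = false then (result, addr, size, true)
  else if seen then (result, addr, size ++ [ch], seen)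
  else (result, addr ++ [ch], size, seen)

def parse_memory_spec_py_alt (text : String) : List (List (String × String)) :=
  let st := text.toList.foldl pm_step ([], [], [], false)
  pm_emit st.1 st.2.1 st.2.2.1 st.2.2.2

-- ===== PRECONDITION & SPEC =====
def Spec_parse_memory_spec_py (text : String) (out : List (List (String × String))) : Prop := out = parse_memory_spec_py_alt text
instance (text : String) (out : List (List (String × String))) : Decidable (Spec_parse_memory_spec_py text out) := by unfold Spec_parse_memory_spec_py; infer_instance

-- ===== CLAIM (what is proved, stated in full; the proofs are below) =====
def Claim_equal_parse_memory_spec_py : Prop := ∀ (text : String), Dom_parse_memory_spec_py text → Spec_parse_memory_spec_py text (parse_memory_spec_py text)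

-- ===== LEMMAS AND PROOFS =====

-- chunk-local scanner state (mirrors pm_step's non-comma branches, without the result)
def pmStepChunk (st : List Char × List Char × Bool) (ch : Char) : List Char × List Char × Bool :=
  if ch = ':' ∧ st.2.2 = false then (st.1, st.2.1, true)
  else if st.2.2 then (st.1, st.2.1 ++ [ch], st.2.2)
  else (st.1 ++ [ch], st.2.1, st.2.2)

def pmScan (q : List Char) : List Char × List Char × Bool :=
  q.foldl pmStepChunk ([], [], false)

-- what pm_emit appends, as a list
def pmEmitList (addr size : List Char) (seen : Bool) : List (List (String × String)) :=
  if seen then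
    (if PySem.Chars.strip addr ≠ [] ∧ PySem.Chars.strip size ≠ [] then
      [[("addr", String.ofList (PySem.Chars.strip addr)), ("size", String.ofList (PySem.Chars.strip size))]]
    else [])
  else []

-- B's contribution of one raw comma-chunk
def pmEmitB (chunk : List Char) : List (List (String × String)) :=
  pmEmitList (pmScan chunk).1 (pmScan chunk).2.1 (pmScan chunk).2.2

-- A's per-item body, as a list
def pmProcA (item : List Char) : List (List (String × String)) :=
  if PySem.Chars.isIn [':'] item then
    match PySem.Chars.splitOnMax item [':'] 1 with
    | [a0, s0] =>
      if PySem.Chars.strip a0 ≠ [] ∧ PySem.Chars.strip s0 ≠ [] then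
        [[("addr", String.ofList (PySem.Chars.strip a0)), ("size", String.ofList (PySem.Chars.strip s0))]]
      else []
    | _ => []
  else []

lemma pm_emit_eq (r : List (List (String × String))) (a s : List Char) (se : Bool) :
    pm_emit r a s se = r ++ pmEmitList a s se := by
  unfold pm_emit pmEmitList
  split_ifs <;> simp_all

lemma pm_step_comma (r : List (List (String × String))) (a s : List Char) (se : Bool) :
    pm_step (r, a, s, se) ',' = (r ++ pmEmitList a s se, [], [], false) := by
  simp [pm_step, pm_emit_eq]

lemma pm_step_other (r : List (List (String × String))) (a s : List Char) (se : Bool)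
    {ch : Char} (h : ch ≠ ',') :
    pm_step (r, a, s, se) ch = (r, pmStepChunk (a, s, se) ch) := by
  simp only [pm_step, pmStepChunk, if_neg h]
  split_ifs <;> rfl

lemma pmScan_snoc (q : List Char) (ch : Char) :
    pmScan (q ++ [ch]) = pmStepChunk (pmScan q) ch := by
  simp [pmScan]

-- ---- splitOn on a one-character separator is List.splitOnP ----

lemma splitOn_go_eq (c : Char) (l : List Char) :
    ∀ (fuel : Nat) (cur : List Char) (acc : List (List Char)), l.length ≤ fuel →
    PySem.Chars.splitOn.go [c] fuel l cur acc
      = acc.reverse ++ List.modifyHead (fun h => cur.reverse ++ h) (List.splitOnP (· == c) l) := by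
  induction l with
  | nil =>
    intro fuel cur acc _
    cases fuel <;> rw [PySem.Chars.splitOn.go.eq_def] <;> simp [List.splitOnP_nil]
  | cons ch rest ih =>
    intro fuel cur acc h
    match fuel, h with
    | Nat.succ f, h =>
      rw [PySem.Chars.splitOn.go.eq_def]
      simp only [List.isPrefixOf, Bool.and_true]
      by_cases hc : c = ch
      · subst hc
        simp only [beq_self_eq_true, if_pos]
        simp only [List.length_cons, List.length_nil, List.drop_succ_cons, List.drop_zero]
        rw [ih f [] (cur.reverse :: acc) (by simpa using Nat.le_of_succ_le_succ h)]
        rw [List.splitOnP_cons]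
        simp only [beq_self_eq_true, if_pos, List.reverse_cons, List.modifyHead_cons,
          List.reverse_nil, List.nil_append, List.append_assoc, List.singleton_append]
        cases List.splitOnP (fun x => x == c) rest <;> simp
      · have hb : (c == ch) = false := by simp [hc]
        simp only [hb, if_neg Bool.false_ne_true]
        rw [ih f (ch :: cur) acc (by simpa using Nat.le_of_succ_le_succ h)]
        rw [List.splitOnP_cons]
        have hb2 : (ch == c) = false := by simp [Ne.symm hc]
        simp only [hb2, if_neg Bool.false_ne_true, List.modifyHead_modifyHead]
        congr 1
        cases List.splitOnP (· == c) rest <;> simp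

lemma splitOn_singleton (cs : List Char) (c : Char) :
    PySem.Chars.splitOn cs [c] = List.splitOnP (· == c) cs := by
  unfold PySem.Chars.splitOn
  rw [splitOn_go_eq c cs (cs.length + 1) [] [] (by omega)]
  cases List.splitOnP (· == c) cs <;> simp

-- ---- item.split(":", 1) with ":" in item ----

lemma splitOnMax_go_zero (sep : List Char) (fuel : Nat) (l cur : List Char)
    (acc : List (List Char)) :
    PySem.Chars.splitOnMax.go sep fuel 0 l cur acc = ((cur.reverse ++ l) :: acc).reverse := by
  cases fuel <;> cases l <;> rw [PySem.Chars.splitOnMax.go.eq_def] <;> simp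

lemma splitOnMax_go_colon (b : List Char) :
    ∀ (af cur : List Char) (acc : List (List Char)) (fuel : Nat),
    ':' ∉ b → (b ++ ':' :: af).length ≤ fuel →
    PySem.Chars.splitOnMax.go [':'] fuel 1 (b ++ ':' :: af) cur acc
      = acc.reverse ++ [cur.reverse ++ b, af] := by
  induction b with
  | nil =>
    intro af cur acc fuel _ h
    match fuel, h with
    | Nat.succ f, h =>
      rw [PySem.Chars.splitOnMax.go.eq_def]
      simp only [List.nil_append, List.isPrefixOf, Bool.and_true,
        beq_self_eq_true, if_pos]
      norm_num
      rw [splitOnMax_go_zero]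
      simp
  | cons ch b' ih =>
    intro af cur acc fuel hmem h
    match fuel, h with
    | Nat.succ f, h =>
      rw [PySem.Chars.splitOnMax.go.eq_def]
      have hch : ch ≠ ':' := fun hc => hmem (by simp [hc])
      have hb : ((':' : Char) == ch) = false := by simp [Ne.symm hch]
      simp only [List.cons_append, List.isPrefixOf, Bool.and_true, hb,
        if_neg Bool.false_ne_true]
      norm_num
      rw [ih af (ch :: cur) acc f (fun hm => hmem (List.mem_cons_of_mem _ hm))
        (by simpa using Nat.le_of_succ_le_succ (by simpa using h))]
      simp

lemma splitOnMax_colon (b af : List Char) (hb : ':' ∉ b) :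
    PySem.Chars.splitOnMax (b ++ ':' :: af) [':'] 1 = [b, af] := by
  unfold PySem.Chars.splitOnMax
  rw [if_neg (by norm_num), show Int.toNat 1 = 1 from rfl]
  rw [splitOnMax_go_colon b af [] [] ((b ++ ':' :: af).length + 1) hb (by omega)]
  simp

-- ---- ":" in item ----

lemma isIn_singleton (c : Char) (l : List Char) :
    PySem.Chars.isIn [c] l = true ↔ c ∈ l := by
  rw [PySem.Chars.isIn_iff_infix]
  constructor
  · intro h; exact h.subset (List.mem_singleton_self c)
  · intro h
    obtain ⟨s, t, rfl⟩ := List.append_of_mem h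
    exact ⟨s, t, by simp⟩

-- ---- strip facts ----

lemma dropWhile_idem (p : Char → Bool) (l : List Char) :
    List.dropWhile p (List.dropWhile p l) = List.dropWhile p l := by
  induction l with
  | nil => simp
  | cons x xs ih =>
    by_cases h : p x = true <;> simp [h, ih]

lemma lstrip_append_cons (u v : List Char) {c : Char} (hc : PySem.Chars.isspace c = false) :
    PySem.Chars.lstrip (u ++ c :: v) = PySem.Chars.lstrip u ++ c :: v := by
  unfold PySem.Chars.lstrip
  rw [List.dropWhile_append]
  split_ifs with h
  · simp_all [List.isEmpty_iff]
  · rfl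

lemma rstrip_append_cons (u v : List Char) {c : Char} (hc : PySem.Chars.isspace c = false) :
    PySem.Chars.rstrip (u ++ c :: v) = u ++ c :: PySem.Chars.rstrip v := by
  unfold PySem.Chars.rstrip
  have : (u ++ c :: v).reverse = v.reverse ++ c :: u.reverse := by simp
  rw [this]
  have h2 := lstrip_append_cons v.reverse u.reverse hc
  unfold PySem.Chars.lstrip at h2
  rw [h2]
  simp

lemma strip_append_cons (u v : List Char) {c : Char} (hc : PySem.Chars.isspace c = false) :
    PySem.Chars.strip (u ++ c :: v) = PySem.Chars.lstrip u ++ c :: PySem.Chars.rstrip v := by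
  unfold PySem.Chars.strip
  rw [lstrip_append_cons u v hc, rstrip_append_cons _ v hc]

lemma strip_lstrip (u : List Char) :
    PySem.Chars.strip (PySem.Chars.lstrip u) = PySem.Chars.strip u := by
  unfold PySem.Chars.strip PySem.Chars.lstrip
  rw [dropWhile_idem]

lemma rstrip_idem (u : List Char) :
    PySem.Chars.rstrip (PySem.Chars.rstrip u) = PySem.Chars.rstrip u := by
  unfold PySem.Chars.rstrip
  rw [List.reverse_reverse, dropWhile_idem]

lemma lstrip_all_space {u : List Char} (h : ∀ x ∈ u, PySem.Chars.isspace x = true) :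
    PySem.Chars.lstrip u = [] := by
  unfold PySem.Chars.lstrip
  exact List.dropWhile_eq_nil_iff.mpr h

lemma rstrip_all_space {u : List Char} (h : ∀ x ∈ u, PySem.Chars.isspace x = true) :
    PySem.Chars.rstrip u = [] := by
  unfold PySem.Chars.rstrip
  simp [List.dropWhile_eq_nil_iff.mpr (fun x hx => h x (List.mem_reverse.mp hx))]

lemma dropWhile_eq_cons_head (p : Char → Bool) (l : List Char) (c : Char) (y : List Char)
    (h : List.dropWhile p l = c :: y) : p c = false := by
  induction l with
  | nil => cases h
  | cons a l ih =>
    rw [List.dropWhile_cons] at h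
    split_ifs at h with ha
    · exact ih h
    · cases h; simpa using ha

lemma strip_rstrip (u : List Char) :
    PySem.Chars.strip (PySem.Chars.rstrip u) = PySem.Chars.strip u := by
  rcases h : PySem.Chars.lstrip u with _ | ⟨c, y⟩
  · -- u is all whitespace
    have hall : ∀ x ∈ u, PySem.Chars.isspace x = true := by
      intro x hx
      have := List.dropWhile_eq_nil_iff.mp (by simpa [PySem.Chars.lstrip] using h)
      simpa using this x hx
    rw [rstrip_all_space hall]
    unfold PySem.Chars.strip
    rw [h]
    simp [PySem.Chars.lstrip, PySem.Chars.rstrip]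
  · -- u = w ++ c :: y with w all-space and ¬isspace c
    have hc : PySem.Chars.isspace c = false :=
      dropWhile_eq_cons_head PySem.Chars.isspace u c y (by simpa [PySem.Chars.lstrip] using h)
    obtain ⟨w, hw1, hu⟩ : ∃ w, (∀ x ∈ w, PySem.Chars.isspace x = true) ∧ u = w ++ c :: y :=
      ⟨u.takeWhile PySem.Chars.isspace, fun x hx => List.mem_takeWhile_imp hx, by
        conv_lhs => rw [← List.takeWhile_append_dropWhile (p := PySem.Chars.isspace) (l := u)]
        rw [show List.dropWhile PySem.Chars.isspace u = c :: y from h]⟩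
    subst hu
    rw [rstrip_append_cons w y hc, strip_append_cons w _ hc, strip_append_cons w y hc,
      lstrip_all_space hw1, rstrip_idem]

lemma mem_lstrip {a : Char} {l : List Char} (h : a ∈ PySem.Chars.lstrip l) : a ∈ l :=
  (List.dropWhile_sublist _).mem h

lemma mem_strip {a : Char} {l : List Char} (h : a ∈ PySem.Chars.strip l) : a ∈ l := by
  unfold PySem.Chars.strip PySem.Chars.rstrip at h
  have h2 : a ∈ List.dropWhile PySem.Chars.isspace (PySem.Chars.lstrip l).reverse :=
    List.mem_reverse.mp h
  have h3 : a ∈ (PySem.Chars.lstrip l).reverse := (List.dropWhile_sublist _).mem h2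
  exact mem_lstrip (List.mem_reverse.mp h3)

lemma not_space_colon : PySem.Chars.isspace ':' = false := by decide

-- ---- chunk-scan characterisation ----

lemma scan_no_colon_aux (q : List Char) :
    ∀ (a s : List Char), ':' ∉ q → (',' ∉ q) →
    q.foldl pmStepChunk (a, s, false) = (a ++ q, s, false) := by
  induction q with
  | nil => intro a s _ _; simp
  | cons ch q ih =>
    intro a s hc _hm
    have h1 : ch ≠ ':' := fun h => hc (by simp [h])
    have hstep : pmStepChunk (a, s, false) ch = (a ++ [ch], s, false) := by
      simp [pmStepChunk, h1]
    rw [List.foldl_cons, hstep,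
      ih (a ++ [ch]) s (fun h => hc (List.mem_cons_of_mem _ h))
        (fun h => _hm (List.mem_cons_of_mem _ h))]
    simp

lemma scan_seen_aux (af : List Char) :
    ∀ (a s : List Char), af.foldl pmStepChunk (a, s, true) = (a, s ++ af, true) := by
  induction af with
  | nil => intro a s; simp
  | cons ch af ih =>
    intro a s
    have hstep : pmStepChunk (a, s, true) ch = (a, s ++ [ch], true) := by
      simp [pmStepChunk]
    rw [List.foldl_cons, hstep, ih a (s ++ [ch])]
    simp

lemma pmScan_no_colon {q : List Char} (hc : ':' ∉ q) (hm : ',' ∉ q) :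
    pmScan q = (q, [], false) := by
  unfold pmScan
  rw [scan_no_colon_aux q [] [] hc hm]
  simp

lemma pmScan_colon {b : List Char} (af : List Char) (hb : ':' ∉ b) (hm : ',' ∉ b) :
    pmScan (b ++ ':' :: af) = (b, af, true) := by
  unfold pmScan
  rw [List.foldl_append, scan_no_colon_aux b [] [] hb hm]
  rw [List.foldl_cons, show pmStepChunk ([] ++ b, [], false) ':' = ([] ++ b, [], true) by
    simp [pmStepChunk]]
  rw [scan_seen_aux af ([] ++ b) []]
  simp

-- ---- per-chunk equality: A's processing of a raw comma-chunk equals B's ----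

lemma exists_first_colon : ∀ {l : List Char}, ':' ∈ l → ∃ b af, l = b ++ ':' :: af ∧ ':' ∉ b := by
  intro l
  induction l with
  | nil => intro h; cases h
  | cons x xs ih =>
    intro hc
    by_cases hx : x = ':'
    · subst hx; exact ⟨[], xs, rfl, by simp⟩
    · obtain ⟨b, af, heq, hb⟩ := ih (by
        rcases List.mem_cons.mp hc with h | h
        · exact absurd h.symm hx
        · exact h)
      exact ⟨x :: b, af, by rw [heq]; rfl, by
        intro h
        rcases List.mem_cons.mp h with h | h
        · exact hx h.symm
        · exact hb h⟩

lemma per_chunk (chunk : List Char) (hm : ',' ∉ chunk) :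
    (if PySem.Chars.strip chunk = [] then [] else pmProcA (PySem.Chars.strip chunk))
      = pmEmitB chunk := by
  by_cases hc : ':' ∈ chunk
  · -- split chunk at its first colon
    obtain ⟨b, af, rfl, hb⟩ := exists_first_colon hc
    have hmb : ',' ∉ b := fun h => hm (by simp [h])
    have hstrip : PySem.Chars.strip (b ++ ':' :: af)
        = PySem.Chars.lstrip b ++ ':' :: PySem.Chars.rstrip af :=
      strip_append_cons b af not_space_colon
    have hlb : ':' ∉ PySem.Chars.lstrip b := fun h => hb (mem_lstrip h)
    rw [pmEmitB, pmScan_colon af hb hmb]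
    rw [hstrip]
    rw [if_neg (by simp)]
    unfold pmProcA
    rw [if_pos ((isIn_singleton ':' _).mpr (by simp))]
    rw [splitOnMax_colon _ _ hlb]
    simp [pmEmitList, strip_lstrip, strip_rstrip]
  · -- no colon in the chunk: both sides empty
    rw [pmEmitB, pmScan_no_colon hc hm]
    simp only [pmEmitList, if_neg Bool.false_ne_true]
    split_ifs with h
    · rfl
    · unfold pmProcA
      rw [if_neg ?_]
      intro habs
      exact hc (mem_strip ((isIn_singleton ':' _).mp habs))

-- ---- the foldl shapes ----

lemma a_body_eq :
    (fun (result : List (List (String × String))) (item : List Char) =>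
      if PySem.Chars.isIn [':'] item then
        match PySem.Chars.splitOnMax item [':'] 1 with
        | [a0, s0] =>
          let addr := PySem.Chars.strip a0
          let size := PySem.Chars.strip s0
          if addr ≠ [] ∧ size ≠ [] then
            result ++ [[("addr", String.ofList addr), ("size", String.ofList size)]]
          else result
        | _ => result
      else result)
    = fun result item => result ++ pmProcA item := by
  funext result item
  unfold pmProcA
  split_ifs with h
  · rcases hs : PySem.Chars.splitOnMax item [':'] 1 with _ | ⟨a0, _ | ⟨s0, _ | _⟩⟩ <;>
      simp only [] <;> try simp
    split_ifs <;> simp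
  · simp

lemma flatMap_map_filter {α β : Type} (f : α → List β) (m : α → α) (g : α → Bool) (l : List α) :
    List.flatMap f (List.map m (List.filter g l))
      = List.flatMap (fun x => if g x then f (m x) else []) l := by
  induction l with
  | nil => simp
  | cons x xs ih =>
    rw [List.filter_cons]
    split_ifs with h <;> simp [h, ih]

lemma splitOnP_all_false {q : List Char} (h : ∀ x ∈ q, (x == ',') = false) :
    List.splitOnP (· == ',') q = [q] :=
  List.splitOnP_eq_single _ _ (by intro x hx; simp [h x hx])

lemma splitOnP_append_comma {q : List Char} (rest : List Char)
    (h : ∀ x ∈ q, (x == ',') = false) :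
    List.splitOnP (· == ',') (q ++ ',' :: rest) = q :: List.splitOnP (· == ',') rest := by
  induction q with
  | nil => simp [List.splitOnP_cons]
  | cons x q ih =>
    rw [List.cons_append, List.splitOnP_cons, if_neg (by simp [h x (by simp)]),
      ih (fun y hy => h y (List.mem_cons_of_mem _ hy))]
    rfl

-- main fold decomposition of B
lemma b_fold (cs : List Char) :
    ∀ (q : List Char) (r : List (List (String × String))), (∀ x ∈ q, (x == ',') = false) →
    (let st := List.foldl pm_step (r, pmScan q) cs
     pm_emit st.1 st.2.1 st.2.2.1 st.2.2.2)
      = r ++ (List.splitOnP (· == ',') (q ++ cs)).flatMap pmEmitB := by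
  induction cs with
  | nil =>
    intro q r h
    simp only [List.foldl_nil, List.append_nil, splitOnP_all_false h, List.flatMap_cons,
      List.flatMap_nil, List.append_nil]
    rcases hsc : pmScan q with ⟨a, s, se⟩
    rw [pm_emit_eq]
    unfold pmEmitB
    rw [hsc]
  | cons ch cs ih =>
    intro q r h
    simp only [List.foldl_cons]
    by_cases hch : ch = ','
    · subst hch
      rcases hsc : pmScan q with ⟨a, s, se⟩
      rw [pm_step_comma]
      have hEB : pmEmitList a s se = pmEmitB q := by unfold pmEmitB; rw [hsc]
      rw [hEB, splitOnP_append_comma cs h]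
      have := ih [] (r ++ pmEmitB q) (by simp)
      simp only [pmScan, List.foldl_nil, List.nil_append] at this
      rw [this]
      simp
    · rcases hsc : pmScan q with ⟨a, s, se⟩
      rw [pm_step_other r a s se hch]
      have hq : (∀ x ∈ q ++ [ch], (x == ',') = false) := by
        intro x hx
        rcases List.mem_append.mp hx with hx | hx
        · exact h x hx
        · simp only [List.mem_singleton] at hx; subst hx; simp [hch]
      have := ih (q ++ [ch]) r hq
      rw [show pmScan (q ++ [ch]) = pmStepChunk (a, s, se) ch by rw [pmScan_snoc, hsc],
        List.append_assoc, List.singleton_append] at this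
      exact this

-- A as a flatMap over the raw comma-chunks
lemma splitOnP_ne_nil (p : Char → Bool) (l : List Char) : List.splitOnP p l ≠ [] := by
  induction l with
  | nil => simp [List.splitOnP_nil]
  | cons a l ih =>
    rw [List.splitOnP_cons]
    split_ifs
    · simp
    · rcases h : List.splitOnP p l with _ | _
      · exact absurd h ih
      · simp

lemma mem_mem_splitOnP (p : Char → Bool) :
    ∀ (l : List Char) (chunk : List Char) (x : Char),
    chunk ∈ List.splitOnP p l → x ∈ chunk → p x = false := by
  intro l
  induction l with
  | nil =>
    intro chunk x hchunk hx
    rw [List.splitOnP_nil, List.mem_singleton] at hchunk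
    subst hchunk; cases hx
  | cons a l ih =>
    intro chunk x hchunk hx
    rw [List.splitOnP_cons] at hchunk
    split_ifs at hchunk with ha
    · rcases List.mem_cons.mp hchunk with rfl | h
      · cases hx
      · exact ih chunk x h hx
    · rcases h : List.splitOnP p l with _ | ⟨c0, cr⟩
      · exact absurd h (splitOnP_ne_nil p l)
      · rw [h, List.modifyHead_cons] at hchunk
        rcases List.mem_cons.mp hchunk with rfl | hmem
        · rcases List.mem_cons.mp hx with rfl | hx0
          · simpa using ha
          · exact ih c0 x (by rw [h]; exact List.mem_cons_self) hx0
        · exact ih chunk x (by rw [h]; exact List.mem_cons_of_mem _ hmem) hx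

lemma flatMap_congr' {α β : Type} (f g : α → List β) (l : List α)
    (h : ∀ x ∈ l, f x = g x) : List.flatMap f l = List.flatMap g l := by
  induction l with
  | nil => rfl
  | cons x xs ih =>
    simp only [List.flatMap_cons, h x (by simp), ih (fun y hy => h y (List.mem_cons_of_mem _ hy))]

lemma a_eq_flatMap (text : String) :
    parse_memory_spec_py text
      = (List.splitOnP (· == ',') text.toList).flatMap pmEmitB := by
  unfold parse_memory_spec_py split_csv_chars
  by_cases hnil : text.toList = []
  · rw [hnil]
    simp only [if_pos rfl, List.foldl_nil, List.splitOnP_nil, List.flatMap_cons, List.flatMap_nil,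
      List.append_nil]
    rfl
  · rw [if_neg hnil]
    rw [a_body_eq, splitOn_singleton]
    rw [PySem.List.foldl_append_eq_flatMap]
    rw [show (List.filter (fun item => decide ¬PySem.Chars.strip item = []) (List.splitOnP (· == ',') text.toList))
        = List.filter (fun item => !(PySem.Chars.strip item).isEmpty) (List.splitOnP (· == ',') text.toList) by
      congr 1; funext item; rcases h : PySem.Chars.strip item with _ | _ <;> simp [h]]
    rw [flatMap_map_filter]
    simp only [List.nil_append]
    apply flatMap_congr'
    intro chunk hchunk
    have hm : ',' ∉ chunk := fun hmem => by
      simpa using mem_mem_splitOnP (· == ',') text.toList chunk ',' hchunk hmem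
    rw [← per_chunk chunk hm]
    rcases h : PySem.Chars.strip chunk with _ | _ <;> simp [h]

-- ===== VERDICT (by name: the statement is the Claim_ definition above) =====
theorem parse_memory_spec_py_spec : Claim_equal_parse_memory_spec_py := by
  intro text _
  unfold Spec_parse_memory_spec_py
  have hb := b_fold text.toList [] [] (by simp)
  have ha := a_eq_flatMap text
  unfold parse_memory_spec_py_alt
  simp only [List.nil_append] at hb
  rw [ha, show pmScan [] = ([], [], false) from rfl] at *
  exact hb.symm
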